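-- pv_equiv track=rewrite | github.com/danfmartinez/calculadora | calculadora.py | hex_a_bin
-- ===== SOURCE A (Python) =====
-- def hex_a_bin(hexa: str) -> int:
--     dicthex2bin = {'0':'0000','1':'0001','2':'0010','3':'0011','4':'0100','5':'0101','6':'0110',
--                    '7':'0111','8':'1000','9':'1001','A':'1010','B':'1011','C':'1100',
--                    'D':'1101','E':'1110','F':'1111'}
--     Numbin = []
--     Nlist = list(hexa)
--     for i in Nlist:
--         Numbin.append(dicthex2bin[i])
--     if len(Numbin) != 1:
--         Nbb = ''
--         for i in range(0,len(Numbin)):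
--             Nbb = Nbb+ Numbin[i]
--     else:
--         Nbb = str(Numbin[0])
--
--     Numbin = list(Nbb)
--     for i in range(0,len(Numbin)):
--         Numbin[i] = int(Numbin[i])
--     binario=0
--     l=len(Numbin)-1
--     for i in range(len(Numbin)):
--         binario += int(Numbin[i])*10**l
--         l=l-1
--     return binario
-- ===== SOURCE B (Python) =====
-- def hex_a_bin(hexa: str) -> int:
--     # Each hex digit contributes its 4 binary digits, read as a base-10 number;
--     # fold them arithmetically instead of building and re-parsing strings.
--     nib = {'0': 0, '1': 1, '2': 10, '3': 11, '4': 100, '5': 101, '6': 110,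
--            '7': 111, '8': 1000, '9': 1001, 'A': 1010, 'B': 1011, 'C': 1100,
--            'D': 1101, 'E': 1110, 'F': 1111}
--     acc = 0
--     for c in hexa:
--         acc = acc * 10000 + nib[c]
--     return acc
-- ===== Notes on version B (the rewrite author's own statement) =====
-- stated objective: simpler
-- what changed: Replaces A's four passes (nibble-string list, string concatenation, per-char int conversion, positional digit*10**l sum) with a single arithmetic fold acc = acc*10000 + nibble, where the lookup maps each hex digit directly to its 4 binary digits read as a base-10 integer; no intermediate strings or lists.
import Mathlib
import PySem

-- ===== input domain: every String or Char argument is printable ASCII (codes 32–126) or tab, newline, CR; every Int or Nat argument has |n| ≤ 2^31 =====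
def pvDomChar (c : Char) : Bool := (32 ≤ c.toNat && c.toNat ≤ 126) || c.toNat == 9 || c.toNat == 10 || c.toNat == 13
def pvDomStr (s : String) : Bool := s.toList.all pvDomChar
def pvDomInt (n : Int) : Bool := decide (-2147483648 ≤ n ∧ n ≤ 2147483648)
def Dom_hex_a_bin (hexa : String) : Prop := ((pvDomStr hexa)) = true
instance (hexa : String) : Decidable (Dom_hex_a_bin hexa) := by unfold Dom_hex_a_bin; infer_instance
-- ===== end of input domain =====

-- B replaces A's four string-building passes with one arithmetic fold (acc*10000 + nibble value); equivalence proved on hex-digit strings.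

-- ===== PORT A =====
-- the dict literal dicthex2bin
def pvDictA : PySem.Dict Char String :=
  PySem.Dict.ofList [('0',"0000"),('1',"0001"),('2',"0010"),('3',"0011"),('4',"0100"),
    ('5',"0101"),('6',"0110"),('7',"0111"),('8',"1000"),('9',"1001"),('A',"1010"),
    ('B',"1011"),('C',"1100"),('D',"1101"),('E',"1110"),('F',"1111")]

def hex_a_bin (hexa : String) : Int :=
  -- Numbin.append(dicthex2bin[i]) for i in list(hexa); the dict lookup raises KeyError outside
  -- Pre_, so getD's default "" is never reached on admitted inputs
  let numbin : List String := hexa.toList.foldl (fun acc c => acc ++ [PySem.Dict.getD pvDictA c ""]) []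
  -- the if/else building Nbb (iterating indices 0..len-1 in order = folding the list in order)
  let nbb : String :=
    if numbin.length ≠ 1 then numbin.foldl (fun s t => s ++ t) ""
    else (PySem.List.pyGet? numbin 0).getD ""   -- Numbin[0]; length is 1 here so pyGet? succeeds
  -- Numbin[i] = int(Numbin[i]): int(c) for a digit char c is exactly c.toNat - 48
  let digits : List Int := nbb.toList.foldl (fun acc c => acc ++ [((c.toNat : Int) - 48)]) []
  -- binario += Numbin[i]*10**l with l counting down from len-1; l is nonnegative at every use,
  -- so 10**l is ported as 10 ^ l.toNat
  (digits.foldl (fun (st : Int × Int) d => (st.1 + d * 10 ^ st.2.toNat, st.2 - 1))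
      ((0 : Int), (digits.length : Int) - 1)).1

-- ===== PORT B =====
def pvNibB : PySem.Dict Char Int :=
  PySem.Dict.ofList [('0',0),('1',1),('2',10),('3',11),('4',100),('5',101),('6',110),
    ('7',111),('8',1000),('9',1001),('A',1010),('B',1011),('C',1100),('D',1101),
    ('E',1110),('F',1111)]

def hex_a_bin_alt (hexa : String) : Int :=
  hexa.toList.foldl (fun acc c => acc * 10000 + PySem.Dict.getD pvNibB c 0) 0

-- ===== PRECONDITION & SPEC =====
-- A raises KeyError on any character outside '0'-'9','A'-'F'; Pre_ admits exactly the hex-digit strings.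
def Pre_hex_a_bin (hexa : String) : Prop :=
  (hexa.toList.all (fun c => decide (c ∈ "0123456789ABCDEF".toList))) = true
instance (hexa : String) : Decidable (Pre_hex_a_bin hexa) := by unfold Pre_hex_a_bin; infer_instance
def pvWitness_hex_a_bin : String := "1A0F"

def Spec_hex_a_bin (hexa : String) (out : Int) : Prop := out = hex_a_bin_alt hexa
instance (hexa : String) (out : Int) : Decidable (Spec_hex_a_bin hexa out) := by unfold Spec_hex_a_bin; infer_instance

-- ===== CLAIM (what is proved, stated in full; the proofs are below) =====
def Claim_equal_hex_a_bin : Prop := ∀ (hexa : String), Dom_hex_a_bin hexa → Pre_hex_a_bin hexa → Spec_hex_a_bin hexa (hex_a_bin hexa)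

-- ===== LEMMAS AND PROOFS =====

-- the base-10 digit fold both programs reduce to
def pvF10 (a d : Int) : Int := a * 10 + d
-- the four binary digits a hex char contributes, as A's int list
def pvNibDigits (c : Char) : List Int :=
  (PySem.Dict.getD pvDictA c "").toList.map (fun c => ((c.toNat : Int) - 48))

theorem pv_foldl_append_eq_map {α β : Type} (f : α → β) :
    ∀ (l : List α) (acc : List β),
      l.foldl (fun acc c => acc ++ [f c]) acc = acc ++ l.map f := by
  intro l
  induction l with
  | nil => simp
  | cons c t ih => intro acc; simp [List.foldl, ih]

theorem pv_toList_foldl_append :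
    ∀ (ss : List String) (s : String),
      (ss.foldl (fun a b => a ++ b) s).toList = s.toList ++ (ss.map String.toList).flatten := by
  intro ss
  induction ss with
  | nil => simp
  | cons x t ih => intro s; simp [List.foldl, ih]

theorem pv_decFrom (ds : List Int) : ∀ a : Int,
    ds.foldl pvF10 a = a * 10 ^ ds.length + ds.foldl pvF10 0 := by
  induction ds with
  | nil => intro a; simp
  | cons d t ih =>
      intro a
      simp only [List.foldl, List.length_cons]
      rw [ih (pvF10 a d), ih (pvF10 0 d)]
      simp only [pvF10]; ring

-- A's positional sum with the counting-down exponent equals the left-to-right digit fold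
theorem pv_aSum_eq : ∀ (ds : List Int) (l : Nat) (b : Int), ds.length = l + 1 →
    (ds.foldl (fun (st : Int × Int) d => (st.1 + d * 10 ^ st.2.toNat, st.2 - 1)) (b, (l : Int))).1
      = b + ds.foldl pvF10 0 := by
  intro ds
  induction ds with
  | nil => intro l b h; simp at h
  | cons d t ih =>
      intro l b h
      simp only [List.length_cons] at h
      simp only [List.foldl]
      rcases t with _ | ⟨d', t'⟩
      · have hl : l = 0 := by simp at h; omega
        subst hl
        simp [pvF10]
      · have hl : l = t'.length + 1 := by simpa using h.symm
        have h1 : ((l : Int) - 1) = ((t'.length + 1 - 1 : Nat) : Int) := by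
          rw [hl]; push_cast; ring
        rw [h1, ih (t'.length + 1 - 1) _ (by simp)]
        rw [pv_decFrom (d' :: t') (pvF10 0 d)]
        simp only [hl, Int.toNat_natCast, pvF10, List.length_cons]
        ring

-- one hex digit: folding its four binary digits multiplies the accumulator by 10000 and adds B's nibble value
theorem pv_nib (c : Char) (hc : c ∈ ("0123456789ABCDEF".toList)) (a : Int) :
    (pvNibDigits c).foldl pvF10 a = a * 10000 + PySem.Dict.getD pvNibB c 0 := by
  have hc' : c = '0' ∨ c = '1' ∨ c = '2' ∨ c = '3' ∨ c = '4' ∨ c = '5' ∨ c = '6' ∨ c = '7' ∨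
      c = '8' ∨ c = '9' ∨ c = 'A' ∨ c = 'B' ∨ c = 'C' ∨ c = 'D' ∨ c = 'E' ∨ c = 'F' := by
    simpa [show ("0123456789ABCDEF".toList) = ['0','1','2','3','4','5','6','7','8','9','A','B','C','D','E','F'] from rfl] using hc
  rcases hc' with rfl|rfl|rfl|rfl|rfl|rfl|rfl|rfl|rfl|rfl|rfl|rfl|rfl|rfl|rfl|rfl
  · rw [show pvNibDigits '0' = [0,0,0,0] from by decide,
        show PySem.Dict.getD pvNibB '0' 0 = 0 from by decide]
    simp only [List.foldl_cons, List.foldl_nil, pvF10]; ring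
  · rw [show pvNibDigits '1' = [0,0,0,1] from by decide,
        show PySem.Dict.getD pvNibB '1' 0 = 1 from by decide]
    simp only [List.foldl_cons, List.foldl_nil, pvF10]; ring
  · rw [show pvNibDigits '2' = [0,0,1,0] from by decide,
        show PySem.Dict.getD pvNibB '2' 0 = 10 from by decide]
    simp only [List.foldl_cons, List.foldl_nil, pvF10]; ring
  · rw [show pvNibDigits '3' = [0,0,1,1] from by decide,
        show PySem.Dict.getD pvNibB '3' 0 = 11 from by decide]
    simp only [List.foldl_cons, List.foldl_nil, pvF10]; ring
  · rw [show pvNibDigits '4' = [0,1,0,0] from by decide,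
        show PySem.Dict.getD pvNibB '4' 0 = 100 from by decide]
    simp only [List.foldl_cons, List.foldl_nil, pvF10]; ring
  · rw [show pvNibDigits '5' = [0,1,0,1] from by decide,
        show PySem.Dict.getD pvNibB '5' 0 = 101 from by decide]
    simp only [List.foldl_cons, List.foldl_nil, pvF10]; ring
  · rw [show pvNibDigits '6' = [0,1,1,0] from by decide,
        show PySem.Dict.getD pvNibB '6' 0 = 110 from by decide]
    simp only [List.foldl_cons, List.foldl_nil, pvF10]; ring
  · rw [show pvNibDigits '7' = [0,1,1,1] from by decide,
        show PySem.Dict.getD pvNibB '7' 0 = 111 from by decide]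
    simp only [List.foldl_cons, List.foldl_nil, pvF10]; ring
  · rw [show pvNibDigits '8' = [1,0,0,0] from by decide,
        show PySem.Dict.getD pvNibB '8' 0 = 1000 from by decide]
    simp only [List.foldl_cons, List.foldl_nil, pvF10]; ring
  · rw [show pvNibDigits '9' = [1,0,0,1] from by decide,
        show PySem.Dict.getD pvNibB '9' 0 = 1001 from by decide]
    simp only [List.foldl_cons, List.foldl_nil, pvF10]; ring
  · rw [show pvNibDigits 'A' = [1,0,1,0] from by decide,
        show PySem.Dict.getD pvNibB 'A' 0 = 1010 from by decide]
    simp only [List.foldl_cons, List.foldl_nil, pvF10]; ring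
  · rw [show pvNibDigits 'B' = [1,0,1,1] from by decide,
        show PySem.Dict.getD pvNibB 'B' 0 = 1011 from by decide]
    simp only [List.foldl_cons, List.foldl_nil, pvF10]; ring
  · rw [show pvNibDigits 'C' = [1,1,0,0] from by decide,
        show PySem.Dict.getD pvNibB 'C' 0 = 1100 from by decide]
    simp only [List.foldl_cons, List.foldl_nil, pvF10]; ring
  · rw [show pvNibDigits 'D' = [1,1,0,1] from by decide,
        show PySem.Dict.getD pvNibB 'D' 0 = 1101 from by decide]
    simp only [List.foldl_cons, List.foldl_nil, pvF10]; ring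
  · rw [show pvNibDigits 'E' = [1,1,1,0] from by decide,
        show PySem.Dict.getD pvNibB 'E' 0 = 1110 from by decide]
    simp only [List.foldl_cons, List.foldl_nil, pvF10]; ring
  · rw [show pvNibDigits 'F' = [1,1,1,1] from by decide,
        show PySem.Dict.getD pvNibB 'F' 0 = 1111 from by decide]
    simp only [List.foldl_cons, List.foldl_nil, pvF10]; ring

theorem pv_nibDigits_len (c : Char) (hc : c ∈ ("0123456789ABCDEF".toList)) :
    (pvNibDigits c).length = 4 := by
  have hc' : c = '0' ∨ c = '1' ∨ c = '2' ∨ c = '3' ∨ c = '4' ∨ c = '5' ∨ c = '6' ∨ c = '7' ∨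
      c = '8' ∨ c = '9' ∨ c = 'A' ∨ c = 'B' ∨ c = 'C' ∨ c = 'D' ∨ c = 'E' ∨ c = 'F' := by
    simpa [show ("0123456789ABCDEF".toList) = ['0','1','2','3','4','5','6','7','8','9','A','B','C','D','E','F'] from rfl] using hc
  rcases hc' with rfl|rfl|rfl|rfl|rfl|rfl|rfl|rfl|rfl|rfl|rfl|rfl|rfl|rfl|rfl|rfl <;> decide

theorem pv_flat_len : ∀ (cs : List Char), (∀ c ∈ cs, c ∈ ("0123456789ABCDEF".toList)) →
    ((cs.map pvNibDigits).flatten).length = 4 * cs.length := by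
  intro cs
  induction cs with
  | nil => intro _; simp
  | cons c t ih =>
      intro h
      simp only [List.map_cons, List.flatten_cons, List.length_append, List.length_cons]
      rw [pv_nibDigits_len c (h c (by simp)), ih (fun x hx => h x (by simp [hx]))]
      ring

-- the flattened nibble digits fold to B's single arithmetic pass
theorem pv_flatten_fold : ∀ (cs : List Char), (∀ c ∈ cs, c ∈ ("0123456789ABCDEF".toList)) →
    ∀ a : Int, ((cs.map pvNibDigits).flatten).foldl pvF10 a
      = cs.foldl (fun acc c => acc * 10000 + PySem.Dict.getD pvNibB c 0) a := by
  intro cs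
  induction cs with
  | nil => intro _ a; simp
  | cons c t ih =>
      intro h a
      simp only [List.map_cons, List.flatten_cons, List.foldl_append, List.foldl]
      rw [pv_nib c (h c (by simp)) a, ih (fun x hx => h x (by simp [hx]))]

-- A's digit list is exactly the flattened nibble digits (let-free statement of A's first three passes)
theorem pv_digits_eq (hexa : String) :
    ((if (hexa.toList.foldl (fun acc c => acc ++ [PySem.Dict.getD pvDictA c ""]) []).length ≠ 1
        then (hexa.toList.foldl (fun acc c => acc ++ [PySem.Dict.getD pvDictA c ""]) []).foldl
              (fun s t => s ++ t) ""
        else (PySem.List.pyGet? (hexa.toList.foldl (fun acc c => acc ++ [PySem.Dict.getD pvDictA c ""]) []) 0).getD "").toList.foldl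
        (fun acc c => acc ++ [((c.toNat : Int) - 48)]) [])
    = (hexa.toList.map pvNibDigits).flatten := by
  simp only [pv_foldl_append_eq_map, List.nil_append]
  by_cases h1 : (hexa.toList.map (fun c => PySem.Dict.getD pvDictA c "")).length ≠ 1
  · rw [if_pos h1, pv_toList_foldl_append]
    simp only [List.nil_append, String.toList_empty, List.map_flatten, List.map_map]
    rfl
  · rw [if_neg h1]
    simp only [ne_eq, not_not] at h1
    rcases hlc : hexa.toList with _ | ⟨c, t⟩
    · rw [hlc] at h1; simp at h1
    · rw [hlc] at h1
      have ht : t = [] := by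
        simp only [List.map_cons, List.length_cons, List.length_map] at h1
        exact List.eq_nil_of_length_eq_zero (by omega)
      subst ht
      simp [PySem.List.pyGet?, PySem.List.pyIdx?, pvNibDigits]

theorem pv_main (hexa : String) (hp : ∀ c ∈ hexa.toList, c ∈ ("0123456789ABCDEF".toList)) :
    hex_a_bin hexa = hex_a_bin_alt hexa := by
  unfold hex_a_bin hex_a_bin_alt
  simp only []
  rw [pv_digits_eq hexa]
  rcases hc : hexa.toList with _ | ⟨c, t⟩
  · simp
  · rw [← hc]
    have hlen : ((hexa.toList.map pvNibDigits).flatten).length = 4 * hexa.toList.length :=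
      pv_flat_len hexa.toList hp
    have hpos : 1 ≤ hexa.toList.length := by rw [hc]; simp
    have hlen1 : ((hexa.toList.map pvNibDigits).flatten).length
        = (((hexa.toList.map pvNibDigits).flatten).length - 1) + 1 := by omega
    have hcast : ((((hexa.toList.map pvNibDigits).flatten).length : Int) - 1)
        = (((((hexa.toList.map pvNibDigits).flatten).length - 1 : Nat)) : Int) := by omega
    rw [hcast, pv_aSum_eq _ _ _ hlen1]
    rw [show ((hexa.toList.map pvNibDigits).flatten).foldl pvF10 0
          = (((hexa.toList.map pvNibDigits).flatten).foldl pvF10 (0 : Int)) from rfl]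
    rw [pv_flatten_fold hexa.toList hp 0]
    ring

-- ===== VERDICT (by name: the statement is the Claim_ definition above) =====
theorem hex_a_bin_spec : Claim_equal_hex_a_bin := by
  intro hexa _ hp
  unfold Spec_hex_a_bin
  exact pv_main hexa (by simpa [Pre_hex_a_bin, List.all_eq_true] using hp)
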